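-- pv_equiv track=rewrite | github.com/adum/robotsrevenge | scripts/generate_levels_v5_cegis.py | format_reject_counts
-- ===== SOURCE A (Python) =====
-- REJECT_CODE_ORDER = (
--     "pb",  # program blueprint build failed
--     "mj",  # meaningless jump
--     "ct",  # guided trace failed
--     "ms",  # trace too short
--     "js",  # no jump/sense activity
--     "sb",  # no S true/false split
--     "ux",  # low coverage or dead instructions
--     "dv",  # low direction diversity in hidden solution
--     "sp",  # low route spread
--     "vc",  # low visited-cell count
--     "ne",  # replay did not escape
--     "sr",  # straight-run limit hit
--     "tc",  # immediate turn-cancel pattern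
--     "pl",  # easy short two-direction program exists
--     "np",  # no movement-only path to exit
--     "md",  # min direction types to exit not met
--     "dn",  # density target not feasible
--     "cx",  # failed known counterexample program
--     "ad",  # adversarial solver found short solution
-- )
--
-- def format_reject_counts(reject_counts: dict[str, int]) -> str:
--     if not reject_counts:
--         return "-"
--     parts: list[str] = []
--     seen: set[str] = set()
--     for code in REJECT_CODE_ORDER:
--         count = reject_counts.get(code, 0)
--         if count <= 0:
--             continue
--         parts.append(f"{code}={count}")
--         seen.add(code)
--     for code in sorted(reject_counts):
--         if code in seen:
--             continue
--         count = reject_counts[code]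
--         if count <= 0:
--             continue
--         parts.append(f"{code}={count}")
--     return " ".join(parts) if parts else "-"
-- ===== SOURCE B (Python) =====
-- REJECT_CODE_ORDER = (
--     "pb", "mj", "ct", "ms", "js", "sb", "ux", "dv", "sp", "vc",
--     "ne", "sr", "tc", "pl", "np", "md", "dn", "cx", "ad",
-- )
--
-- _RANK = {code: i for i, code in enumerate(REJECT_CODE_ORDER)}
--
-- def format_reject_counts(reject_counts: dict[str, int]) -> str:
--     keep = [(code, n) for code, n in reject_counts.items() if n > 0]
--     if not keep:
--         return "-"
--     keep.sort(key=lambda item: (_RANK.get(item[0], len(_RANK)), item[0]))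
--     return " ".join(f"{code}={n}" for code, n in keep)
-- ===== Notes on version B (the rewrite author's own statement) =====
-- stated objective: simpler
-- what changed: Replaced A's two staged emission passes (priority-tuple scan with a 'seen' set, then a scan over the sorted keys) with a single sort of the positive items by the composite key (rank-or-19, code), then one formatting pass.
import Mathlib
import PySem

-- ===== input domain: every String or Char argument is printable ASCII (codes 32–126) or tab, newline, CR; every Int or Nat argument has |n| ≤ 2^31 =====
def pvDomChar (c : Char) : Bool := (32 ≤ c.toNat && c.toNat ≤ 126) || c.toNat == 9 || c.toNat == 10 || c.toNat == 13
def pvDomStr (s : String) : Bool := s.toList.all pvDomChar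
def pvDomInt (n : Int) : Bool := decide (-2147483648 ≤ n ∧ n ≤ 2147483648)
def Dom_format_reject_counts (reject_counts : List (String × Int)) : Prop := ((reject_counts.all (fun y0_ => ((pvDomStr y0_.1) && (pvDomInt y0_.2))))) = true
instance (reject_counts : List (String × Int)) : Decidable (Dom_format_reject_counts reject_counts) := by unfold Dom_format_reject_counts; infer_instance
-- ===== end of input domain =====

-- B replaces A's two staged emission passes (priority scan with a 'seen' set, then a scan of
-- the sorted keys) by ONE sort of the positive items under the composite key (rank-or-19, code);
-- same cost, a simpler single-pass decomposition.

-- ===== PORT A =====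
def pvREJECT_CODE_ORDER : List String :=
  ["pb","mj","ct","ms","js","sb","ux","dv","sp","vc","ne","sr","tc","pl","np","md","dn","cx","ad"]

def format_reject_counts (reject_counts : List (String × Int)) : String :=
  let d := PySem.Dict.ofList reject_counts
  if d.items.isEmpty then "-"
  else
    -- first loop: parts/seen accumulated together
    let ps : List String × PySem.Set String :=
      pvREJECT_CODE_ORDER.foldl (fun acc code =>
        let count := d.getD code 0
        if count ≤ 0 then acc
        else (acc.1 ++ [code ++ "=" ++ PySem.Int.toStr count], PySem.Set.add acc.2 code))
        ([], PySem.Set.empty)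
    -- second loop over sorted(reject_counts); reject_counts[code] is exact as getD here
    -- because code ranges over d.keys (KeyError impossible)
    let parts :=
      (PySem.List.sorted d.keys (fun x => x) false).foldl (fun parts code =>
        if PySem.Set.contains ps.2 code then parts
        else
          let count := d.getD code 0
          if count ≤ 0 then parts
          else parts ++ [code ++ "=" ++ PySem.Int.toStr count]) ps.1
    if parts.isEmpty then "-" else PySem.Str.join " " parts

-- ===== PORT B =====
-- _RANK = {code: i for i, code in enumerate(REJECT_CODE_ORDER)}
def pvRANK : PySem.Dict String Int :=
  PySem.Dict.ofList ((PySem.List.enumerate pvREJECT_CODE_ORDER).map (fun p => (p.2, p.1)))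

def format_reject_counts_alt (reject_counts : List (String × Int)) : String :=
  let d := PySem.Dict.ofList reject_counts
  -- keep = [(code, n) for code, n in reject_counts.items() if n > 0]
  let keep := d.items.filter (fun cn => decide (0 < cn.2))
  if keep.isEmpty then "-"
  else
    -- keep.sort(key=lambda item: (_RANK.get(item[0], len(_RANK)), item[0]))   (len(_RANK) = 19)
    let keepS := PySem.List.sorted2 keep (fun cn => pvRANK.getD cn.1 19) (fun cn => cn.1) false
    PySem.Str.join " " (keepS.map (fun cn => cn.1 ++ "=" ++ PySem.Int.toStr cn.2))

-- ===== PRECONDITION & SPEC =====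
def Spec_format_reject_counts (reject_counts : List (String × Int)) (out : String) : Prop := out = format_reject_counts_alt reject_counts
instance (reject_counts : List (String × Int)) (out : String) : Decidable (Spec_format_reject_counts reject_counts out) := by unfold Spec_format_reject_counts; infer_instance

-- ===== CLAIM (what is proved, stated in full; the proofs are below) =====
def Claim_equal_format_reject_counts : Prop := ∀ (reject_counts : List (String × Int)), Dom_format_reject_counts reject_counts → Spec_format_reject_counts reject_counts (format_reject_counts reject_counts)

-- ===== LEMMAS AND PROOFS =====

-- split A's first loop (pair accumulator) into its two components
theorem pv_loop1_split (d : PySem.Dict String Int) :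
    ∀ (l : List String) (a : List String) (s : PySem.Set String),
      (l.foldl (fun acc code =>
          let count := d.getD code 0
          if count ≤ 0 then acc
          else (acc.1 ++ [code ++ "=" ++ PySem.Int.toStr count], PySem.Set.add acc.2 code)) (a, s))
      = (a ++ (l.filter (fun c => decide (0 < d.getD c 0))).map
            (fun c => c ++ "=" ++ PySem.Int.toStr (d.getD c 0)),
         (l.filter (fun c => decide (0 < d.getD c 0))).foldl PySem.Set.add s) := by
  intro l
  induction l with
  | nil => intro a s; simp
  | cons c t ih =>
    intro a s
    simp only [List.foldl_cons, List.filter_cons]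
    by_cases h : d.getD c 0 ≤ 0
    · have h2 : ¬ (0 < d.getD c 0) := by omega
      simp only [if_pos h, h2, decide_false, Bool.false_eq_true, if_false, ih]
    · have h2 : 0 < d.getD c 0 := by omega
      simp only [if_neg h, h2, decide_true, if_true, ih, List.map_cons, List.foldl_cons,
        List.append_assoc, List.cons_append, List.nil_append]

-- A's second loop is a filter+map append
theorem pv_loop2 (d : PySem.Dict String Int) (seen : PySem.Set String) :
    ∀ (l : List String) (a : List String),
      (l.foldl (fun parts code =>
          if PySem.Set.contains seen code then parts
          else
            let count := d.getD code 0
            if count ≤ 0 then parts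
            else parts ++ [code ++ "=" ++ PySem.Int.toStr count]) a)
      = a ++ (l.filter (fun c => !PySem.Set.contains seen c && decide (0 < d.getD c 0))).map
            (fun c => c ++ "=" ++ PySem.Int.toStr (d.getD c 0)) := by
  intro l
  induction l with
  | nil => intro a; simp
  | cons c t ih =>
    intro a
    simp only [List.foldl_cons, List.filter_cons]
    by_cases hs : PySem.Set.contains seen c = true
    · simp only [hs, Bool.not_true, Bool.false_and, Bool.false_eq_true, if_false, ih]
      simp
    · have hs' : PySem.Set.contains seen c = false := by simpa using hs
      by_cases h : d.getD c 0 ≤ 0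
      · have h2 : (decide (0 < d.getD c 0)) = false := by simp only [decide_eq_false_iff_not]; omega
        simp only [hs', if_pos h, Bool.not_false, Bool.true_and, h2, Bool.false_eq_true,
          if_false, ih]
      · have h2 : (decide (0 < d.getD c 0)) = true := by simp only [decide_eq_true_eq]; omega
        simp only [hs', if_neg h, Bool.not_false, Bool.true_and, h2, if_true, ih, List.map_cons]
        simp [List.append_assoc]

-- getD is 0 off the keys
theorem pv_getD_zero (d : PySem.Dict String Int) (c : String) (h : c ∉ d.keys) :
    d.getD c 0 = 0 := by
  rw [PySem.Dict.getD_eq_get?_getD, (PySem.Dict.get?_eq_none_iff_not_mem_keys d c).mpr h]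
  rfl

theorem pv_mem_items_getD (d : PySem.Dict String Int) (c : String) (hnd : d.keys.Nodup)
    (h : c ∈ d.keys) : (c, d.getD c 0) ∈ d.items := by
  rcases ho : d.get? c with _ | v
  · exact absurd ((PySem.Dict.get?_eq_none_iff_not_mem_keys d c).mp ho) (by simpa using h)
  · have hm := (PySem.Dict.get?_eq_some_iff_mem_items d c v hnd).mp ho
    have : d.getD c 0 = v := by rw [PySem.Dict.getD_eq_get?_getD, ho]; rfl
    rwa [this]

-- Python's tuple-key sort IS the sort by the lexicographic product key
theorem pv_sorted2_eq_sorted_lex {α κ₁ κ₂ : Type} [LinearOrder κ₁] [LinearOrder κ₂]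
    (xs : List α) (k1 : α → κ₁) (k2 : α → κ₂) :
    PySem.List.sorted2 xs k1 k2 false
      = PySem.List.sorted xs (fun x => toLex (k1 x, k2 x)) false := by
  have hfun : (fun (a b : α) => decide (k1 a < k1 b) || (!decide (k1 b < k1 a) && decide (k2 a < k2 b)))
      = (fun a b => decide ((fun x => toLex (k1 x, k2 x)) a < (fun x => toLex (k1 x, k2 x)) b)) := by
    funext a b
    by_cases h1 : k1 a < k1 b
    · simp [Prod.Lex.toLex_lt_toLex, h1]
    · by_cases h2 : k1 b < k1 a
      · simp [Prod.Lex.toLex_lt_toLex, h1, h2, ne_of_gt h2]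
      · have heq : k1 a = k1 b := le_antisymm (not_lt.mp h2) (not_lt.mp h1)
        simp [Prod.Lex.toLex_lt_toLex, heq]
  show List.foldl (fun acc x => PySem.List.insertBy
      (fun a b => decide (k1 a < k1 b) || (!decide (k1 b < k1 a) && decide (k2 a < k2 b))) x acc) [] xs = _
  rw [hfun, PySem.List.sorted_eq_foldl_insertBy]

-- ===== VERDICT (by name: the statement is the Claim_ definition above) =====

theorem format_reject_counts_spec : Claim_equal_format_reject_counts := by
  intro rc _
  unfold Spec_format_reject_counts format_reject_counts format_reject_counts_alt
  set d := PySem.Dict.ofList rc with hd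
  by_cases hemp : d.items.isEmpty
  · have hkeep : d.items.filter (fun cn => decide (0 < cn.2)) = [] := by
      rw [List.isEmpty_iff] at hemp; rw [hemp]; rfl
    simp only [hemp, if_true, hkeep, List.isEmpty_nil]
  · simp only [hemp, Bool.false_eq_true, if_false]
    rw [pv_loop1_split]
    dsimp only
    have hseenfold : (List.filter (fun c => decide (0 < d.getD c 0)) pvREJECT_CODE_ORDER).foldl
        PySem.Set.add PySem.Set.empty
        = PySem.Set.ofList (List.filter (fun c => decide (0 < d.getD c 0)) pvREJECT_CODE_ORDER) :=
      (PySem.Set.ofList_eq_foldl _).symm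
    rw [hseenfold, pv_loop2]
    simp only [List.nil_append]
    -- abbreviations
    have hnd : d.keys.Nodup := hd ▸ PySem.Dict.nodup_keys_ofList rc
    set q : String → Bool := fun c => decide (0 < d.getD c 0) with hq
    set fmt : String → String := fun c => c ++ "=" ++ PySem.Int.toStr (d.getD c 0) with hfmt
    set L := pvREJECT_CODE_ORDER with hL
    set S := PySem.List.sorted d.keys (fun x => x) false with hS
    set seen := PySem.Set.ofList (List.filter q L) with hseen
    set p2 : String → Bool := fun c => !PySem.Set.contains seen c && q c with hp2
    set codes := List.filter q L ++ List.filter p2 S with hcodes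
    set f : String → String × Int := fun c => (c, d.getD c 0) with hf
    set keep := d.items.filter (fun cn => decide (0 < cn.2)) with hkeep
    set g : String → Lex (Int × String) := fun c => toLex (pvRANK.getD c 19, c) with hg
    -- literal facts about the priority table
    have hRANKkeys : pvRANK.keys = L := by decide
    have hLnodup : L.Nodup := by decide
    have hLrank : L.Pairwise (fun a b => pvRANK.getD a 19 < pvRANK.getD b 19) := by decide
    have hLbound : ∀ c ∈ L, pvRANK.getD c 19 < 19 := by decide
    have hrank19 : ∀ c : String, c ∉ L → pvRANK.getD c 19 = 19 := by
      intro c h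
      rw [PySem.Dict.getD_eq_get?_getD,
        (PySem.Dict.get?_eq_none_iff_not_mem_keys pvRANK c).mpr (by rwa [hRANKkeys])]
      rfl
    have hq_keys : ∀ c : String, q c = true → c ∈ d.keys := by
      intro c hc
      by_contra hk
      have := pv_getD_zero d c hk
      rw [hq] at hc
      simp only [decide_eq_true_eq] at hc
      omega
    have hSmem : ∀ c : String, c ∈ S ↔ c ∈ d.keys := fun c =>
      (PySem.List.sorted_perm d.keys (fun x => x) false).mem_iff
    have hSnd : S.Nodup := ((PySem.List.sorted_perm d.keys (fun x => x) false).nodup_iff).mpr hnd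
    -- members of the second bucket are not priority codes
    have hp2_notL : ∀ c : String, p2 c = true → c ∉ L := by
      intro c hc hcl
      rw [hp2] at hc
      simp only [Bool.and_eq_true, Bool.not_eq_eq_eq_not, Bool.not_true] at hc
      have : c ∈ seen := by
        rw [hseen, PySem.Set.mem_ofList, List.mem_filter]
        exact ⟨hcl, hc.2⟩
      rw [(PySem.Set.contains_iff seen c).mpr this] at hc
      simp at hc
    -- keep is the image of its key list under f
    have hkeep_keys : ∀ cn ∈ keep, f cn.1 = cn := by
      rintro ⟨c, v⟩ hcn
      have h1 : (c, v) ∈ d.items := (List.mem_filter.mp hcn).1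
      have : d.getD c 0 = v := PySem.Dict.getD_of_mem_items d h1 hnd 0
      simp [hf, this]
    have hkeep_eq : keep = (keep.map (fun p => p.1)).map f := by
      rw [List.map_map]
      symm
      calc keep.map (f ∘ fun p => p.1)
          = keep.map id := List.map_congr_left (fun cn hcn => hkeep_keys cn hcn)
        _ = keep := List.map_id keep
    have hkknd : (keep.map (fun p => p.1)).Nodup := by
      have hsub : keep.Sublist d.items := by rw [hkeep]; exact List.filter_sublist
      exact List.Nodup.sublist (hsub.map (fun p => p.1)) hnd
    -- key-set equality between codes and keep's keys
    have hkk_iff : ∀ c : String, c ∈ keep.map (fun p => p.1) ↔ c ∈ d.keys ∧ 0 < d.getD c 0 := by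
      intro c
      constructor
      · intro h
        rcases List.mem_map.mp h with ⟨cn, hcn, hc1⟩
        have h1 : cn ∈ d.items ∧ 0 < cn.2 := by
          have := List.mem_filter.mp hcn
          exact ⟨this.1, by simpa using this.2⟩
        subst hc1
        refine ⟨PySem.Dict.mem_keys_of_mem_items d h1.1, ?_⟩
        rcases cn with ⟨c, v⟩
        have : d.getD c 0 = v := PySem.Dict.getD_of_mem_items d h1.1 hnd 0
        simp only [this]
        exact h1.2
      · rintro ⟨hk, hv⟩
        refine List.mem_map.mpr ⟨(c, d.getD c 0), ?_, rfl⟩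
        exact List.mem_filter.mpr ⟨pv_mem_items_getD d c hnd hk, by simpa using hv⟩
    have hcodes_iff : ∀ c : String, c ∈ codes ↔ c ∈ d.keys ∧ 0 < d.getD c 0 := by
      intro c
      rw [hcodes, List.mem_append, List.mem_filter, List.mem_filter]
      constructor
      · rintro (⟨_, hqc⟩ | ⟨hcS, hcp⟩)
        · exact ⟨hq_keys c hqc, by rw [hq] at hqc; simpa using hqc⟩
        · have hqc : q c = true := by
            rw [hp2] at hcp
            simp only [Bool.and_eq_true] at hcp
            exact hcp.2
          exact ⟨(hSmem c).mp hcS, by rw [hq] at hqc; simpa using hqc⟩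
      · rintro ⟨hk, hv⟩
        have hqc : q c = true := by rw [hq]; simpa using hv
        by_cases hcl : c ∈ L
        · exact Or.inl ⟨hcl, hqc⟩
        · refine Or.inr ⟨(hSmem c).mpr hk, ?_⟩
          have hns : PySem.Set.contains seen c = false := by
            rcases hcc : PySem.Set.contains seen c with _ | _
            · rfl
            · have := (PySem.Set.contains_iff seen c).mp hcc
              rw [hseen, PySem.Set.mem_ofList, List.mem_filter] at this
              exact absurd this.1 hcl
          rw [hp2]
          simp only [hns, Bool.not_false, Bool.true_and]
          exact hqc
    -- codes has no duplicates
    have hcodes_nodup : codes.Nodup := by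
      rw [hcodes, List.nodup_append]
      refine ⟨hLnodup.filter _, hSnd.filter _, ?_⟩
      intro a ha b hb heq
      exact hp2_notL b (List.mem_filter.mp hb).2 (heq ▸ (List.mem_filter.mp ha).1)
    have hperm_codes : codes.Perm (keep.map (fun p => p.1)) := by
      rw [List.perm_ext_iff_of_nodup hcodes_nodup hkknd]
      intro c
      rw [hcodes_iff c, hkk_iff c]
    have hperm : (codes.map f).Perm keep := by
      have := hperm_codes.map f
      rwa [← hkeep_eq] at this
    -- codes is strictly increasing under the composite key g
    have hpair_codes : codes.Pairwise (fun a b => g a < g b) := by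
      rw [hcodes, List.pairwise_append]
      refine ⟨List.Pairwise.filter _ (hLrank.imp ?_), ?_, ?_⟩
      · intro a b hab
        exact Prod.Lex.toLex_lt_toLex.mpr (Or.inl hab)
      · have hlt : (List.filter p2 S).Pairwise (fun a b => a < b) := by
          have hle : S.Pairwise (fun a b => a ≤ b) := PySem.List.sorted_pairwise d.keys (fun x => x)
          have hne : S.Pairwise (fun a b => a ≠ b) := hSnd
          exact ((hle.and hne).imp (fun h => lt_of_le_of_ne h.1 h.2)).filter _
        refine hlt.imp_of_mem ?_
        intro a b ha hb hab
        have hna := hp2_notL a (List.mem_filter.mp ha).2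
        have hnb := hp2_notL b (List.mem_filter.mp hb).2
        rw [hg]
        exact Prod.Lex.toLex_lt_toLex.mpr (Or.inr ⟨by rw [hrank19 a hna, hrank19 b hnb], hab⟩)
      · intro a ha b hb
        have haL : a ∈ L := (List.mem_filter.mp ha).1
        have hnb := hp2_notL b (List.mem_filter.mp hb).2
        rw [hg]
        refine Prod.Lex.toLex_lt_toLex.mpr (Or.inl ?_)
        rw [hrank19 b hnb]
        exact hLbound a haL
    have hpair : (codes.map f).Pairwise
        (fun a b => (fun cn => toLex (pvRANK.getD cn.1 19, cn.1)) a
                  < (fun cn => toLex (pvRANK.getD cn.1 19, cn.1)) b) := by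
      rw [List.pairwise_map]
      exact hpair_codes.imp (fun h => h)
    have hsorted : PySem.List.sorted keep (fun cn => toLex (pvRANK.getD cn.1 19, cn.1)) false
        = codes.map f :=
      PySem.List.sorted_eq_of_perm_of_pairwise_lt keep (codes.map f) _ hperm hpair
    have hs2 : PySem.List.sorted2 keep (fun cn => pvRANK.getD cn.1 19) (fun cn => cn.1) false
        = codes.map f := by
      rw [pv_sorted2_eq_sorted_lex keep (fun cn => pvRANK.getD cn.1 19) (fun cn => cn.1)]
      exact hsorted
    -- finish: both guards and both joins coincide
    rw [← List.map_append, ← hcodes, hs2, List.map_map]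
    have hmapeq : codes.map ((fun cn : String × Int => cn.1 ++ "=" ++ PySem.Int.toStr cn.2) ∘ f)
        = codes.map fmt := rfl
    rw [hmapeq]
    have hguard : keep.isEmpty = (codes.map fmt).isEmpty := by
      have hlen : (codes.map fmt).length = keep.length := by
        rw [List.length_map, ← hperm.length_eq, List.length_map]
      by_cases h1 : keep = []
      · have h2 : codes.map fmt = [] := by
          apply List.eq_nil_of_length_eq_zero
          rw [hlen, h1]
          rfl
        rw [h1, h2]
        rfl
      · have h2 : codes.map fmt ≠ [] := by
          intro h
          apply h1
          apply List.eq_nil_of_length_eq_zero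
          rw [← hlen, h]
          rfl
        obtain ⟨a, t, ha⟩ := List.exists_cons_of_ne_nil h1
        obtain ⟨b, s, hb⟩ := List.exists_cons_of_ne_nil h2
        rw [ha, hb]
        rfl
    rw [hguard]
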